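-- pv_equiv track=rewrite | github.com/Glycine26/Project_kulal_matrimony | matrimony_compability_score.py | verify_gender
-- ===== SOURCE A (Python) =====
-- def verify_gender(user_name,active_data_in):
--     male_datas = []
--     female_datas = []
--     passing_data = []
--     u_gender = None
--
--     for gender_datas in active_data_in:
--         if user_name == gender_datas.get("user_name"):
--             u_gender = gender_datas.get("user_gender")
--         genders = gender_datas.get("user_gender")
--         if genders == "Male":
--             male_datas.append(gender_datas)
--         elif genders == "Female":
--             female_datas.append(gender_datas)
--
--     if u_gender == "Male":
--         passing_data = female_datas
--     else:
--         passing_data = male_datas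
--     return passing_data
-- ===== SOURCE B (Python) =====
-- def verify_gender(user_name, active_data_in):
--     u_gender = None
--     for rec in active_data_in:
--         if user_name == rec.get("user_name"):
--             u_gender = rec.get("user_gender")
--     target = "Female" if u_gender == "Male" else "Male"
--     return [rec for rec in active_data_in if rec.get("user_gender") == target]
-- ===== Notes on version B (the rewrite author's own statement) =====
-- stated objective: simpler
-- what changed: Replaces A's single pass that simultaneously accumulates both male and female lists with a find-then-filter decomposition: one scan determines the user's gender (last match wins), then one filter collects the opposite-gender records.
import Mathlib
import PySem

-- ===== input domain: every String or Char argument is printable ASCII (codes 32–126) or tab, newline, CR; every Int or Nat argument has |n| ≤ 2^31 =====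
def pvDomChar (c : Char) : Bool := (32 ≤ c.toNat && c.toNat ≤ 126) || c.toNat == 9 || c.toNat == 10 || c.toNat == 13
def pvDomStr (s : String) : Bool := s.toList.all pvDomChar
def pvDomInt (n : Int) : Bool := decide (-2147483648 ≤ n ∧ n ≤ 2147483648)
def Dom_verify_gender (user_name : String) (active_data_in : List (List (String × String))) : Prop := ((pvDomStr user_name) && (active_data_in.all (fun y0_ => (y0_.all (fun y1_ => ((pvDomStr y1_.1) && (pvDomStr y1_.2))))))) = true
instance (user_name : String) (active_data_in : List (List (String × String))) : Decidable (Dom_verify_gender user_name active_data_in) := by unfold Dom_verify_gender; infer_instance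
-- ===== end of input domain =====

-- B replaces A's single pass building both gender lists with a simpler find-then-filter decomposition (same return value; no mutation involved).

-- dict.get(k) on these assoc-list dicts = first-match lookup: List.lookup (exact; dict keys are unique)
-- ===== PORT A =====
def stepA (user_name : String)
    (st : List (List (String × String)) × List (List (String × String)) × Option String)
    (gender_datas : List (String × String)) :
    List (List (String × String)) × List (List (String × String)) × Option String :=
  let u_gender := if some user_name = List.lookup "user_name" gender_datas
    then List.lookup "user_gender" gender_datas else st.2.2
  let genders := List.lookup "user_gender" gender_datas
  if genders = some "Male" then (st.1 ++ [gender_datas], st.2.1, u_gender)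
  else if genders = some "Female" then (st.1, st.2.1 ++ [gender_datas], u_gender)
  else (st.1, st.2.1, u_gender)

def verify_gender (user_name : String) (active_data_in : List (List (String × String))) : List (List (String × String)) :=
  let st := active_data_in.foldl (stepA user_name) ([], [], none)
  if st.2.2 = some "Male" then st.2.1 else st.1

-- ===== PORT B =====
def verify_gender_alt (user_name : String) (active_data_in : List (List (String × String))) : List (List (String × String)) :=
  let u_gender := active_data_in.foldl
    (fun g rec => if some user_name = List.lookup "user_name" rec
                  then List.lookup "user_gender" rec else g) (none : Option String)
  let target := if u_gender = some "Male" then "Female" else "Male"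
  active_data_in.filter (fun rec => List.lookup "user_gender" rec = some target)

-- ===== PRECONDITION & SPEC =====
def Spec_verify_gender (user_name : String) (active_data_in : List (List (String × String))) (out : List (List (String × String))) : Prop := out = verify_gender_alt user_name active_data_in
instance (user_name : String) (active_data_in : List (List (String × String))) (out : List (List (String × String))) : Decidable (Spec_verify_gender user_name active_data_in out) := by unfold Spec_verify_gender; infer_instance

-- ===== CLAIM =====
def Claim_equal_verify_gender : Prop := ∀ (user_name : String) (active_data_in : List (List (String × String))), Dom_verify_gender user_name active_data_in → Spec_verify_gender user_name active_data_in (verify_gender user_name active_data_in)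

-- ===== LEMMAS AND PROOFS =====
-- A's fold computes (filter "Male", filter "Female", last matching user's gender).
theorem foldA_eq (user_name : String) :
    ∀ (l : List (List (String × String))) (m f : List (List (String × String))) (g : Option String),
    l.foldl (stepA user_name) (m, f, g) =
      (m ++ l.filter (fun gd => List.lookup "user_gender" gd = some "Male"),
       f ++ l.filter (fun gd => List.lookup "user_gender" gd = some "Female"),
       l.foldl (fun g rec => if some user_name = List.lookup "user_name" rec
                  then List.lookup "user_gender" rec else g) g) := by
  intro l
  induction l with
  | nil => simp
  | cons hd tl ih =>
    intro m f g
    simp only [List.foldl_cons, List.filter_cons, stepA]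
    split_ifs <;> simp_all [List.append_assoc]

-- ===== VERDICT =====
theorem verify_gender_spec : Claim_equal_verify_gender := by
  intro user_name active_data_in _
  unfold Spec_verify_gender verify_gender verify_gender_alt
  simp only [foldA_eq, List.nil_append]
  split <;> rfl
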